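-- pv_equiv track=rewrite | github.com/EpicGuy4000/advent-of-code | 2024/day_06/__init__.py | check_loop_exists
-- ===== SOURCE A (Python) =====
-- _obstacle = '#'
--
-- def change_direction(x: int, y: int):
--     match x, y:
--         case (-1,0): #if current direction is up
--            return 0 ,1 #go right
--         case (0,1): #if direction right
--             return 1, 0 #go down
--         case (1,0): #if direction down
--             return 0, -1 #go left
--         case (0,-1): #if direction go left
--             return -1, 0 # go right
--
-- def check_loop_exists(obstacle: tuple[int, int], lab_map: list[str], position: tuple[int, int], move: tuple[int, int]) -> bool:
--     x, y = position
--     x_dim = len(lab_map)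
--     y_dim = len(lab_map[0])
--     visited_locations = set()
--     direction_x, direction_y = move
--
--     while 0 <= x < x_dim and 0 <= y < y_dim:
--         if visited_locations.__contains__(((x, y), (direction_x, direction_y))):
--             return True
--
--         visited_locations.add(((x, y), (direction_x, direction_y)))
--
--         if (0 > x + direction_x or x + direction_x >= x_dim
--                 or 0 > y + direction_y or y + direction_y >= y_dim):
--             return False
--
--         change_count = 0
--
--         while (change_count < 4 and 0 <= x + direction_x < x_dim and 0 <= y + direction_y < y_dim
--                and (lab_map[x + direction_x][y + direction_y] == _obstacle or (x + direction_x, y + direction_y) == obstacle)):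
--             direction_x, direction_y = change_direction(direction_x, direction_y)
--             change_count += 1
--
--         if change_count == 4:
--             return True
--
--         x += direction_x
--         y += direction_y
--
--     return False
-- ===== SOURCE B (Python) =====
-- def check_loop_exists(obstacle, lab_map, position, move):
--     rows = len(lab_map)
--     cols = len(lab_map[0])
--     turn = {(-1, 0): (0, 1), (0, 1): (1, 0), (1, 0): (0, -1), (0, -1): (-1, 0)}
--
--     def blocked(x, y):
--         return lab_map[x][y] == '#' or (x, y) == obstacle
--
--     def step(state):
--         # One guard move: None means the guard walks off the map.
--         (x, y), (dx, dy) = state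
--         if not (0 <= x < rows and 0 <= y < cols):
--             return None
--         if not (0 <= x + dx < rows and 0 <= y + dy < cols):
--             return None
--         for _ in range(4):
--             if not (0 <= x + dx < rows and 0 <= y + dy < cols) or not blocked(x + dx, y + dy):
--                 return (x + dx, y + dy), (dx, dy)
--             dx, dy = turn[(dx, dy)]
--         return state  # boxed in on all four sides: the guard spins forever
--
--     # The guard has at most 4*rows*cols distinct (cell, direction) states, so if
--     # she is still on the map after that many moves she must be in a loop.
--     state = (position, move)
--     for _ in range(4 * rows * cols + 1):
--         state = step(state)
--         if state is None:
--             return False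
--     return True
-- ===== Notes on version B (the rewrite author's own statement) =====
-- stated objective: alternative
-- what changed: Replaces A's hash-set of visited (position, direction) states by a pure step function iterated a fixed pigeonhole bound of 4*rows*cols+1 moves: the guard is in a loop iff she is still on the map after that many moves, so no visited set is kept at all.
-- outside the precondition, e.g. on check_loop_exists((1, 1), ['..', '..'], (0, 0), (0, 0)): A returns True, B returns True; on check_loop_exists((-1, -1), ['..', '.'], (0, 0), (1, 0)): A returns False, B returns False
import Mathlib
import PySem

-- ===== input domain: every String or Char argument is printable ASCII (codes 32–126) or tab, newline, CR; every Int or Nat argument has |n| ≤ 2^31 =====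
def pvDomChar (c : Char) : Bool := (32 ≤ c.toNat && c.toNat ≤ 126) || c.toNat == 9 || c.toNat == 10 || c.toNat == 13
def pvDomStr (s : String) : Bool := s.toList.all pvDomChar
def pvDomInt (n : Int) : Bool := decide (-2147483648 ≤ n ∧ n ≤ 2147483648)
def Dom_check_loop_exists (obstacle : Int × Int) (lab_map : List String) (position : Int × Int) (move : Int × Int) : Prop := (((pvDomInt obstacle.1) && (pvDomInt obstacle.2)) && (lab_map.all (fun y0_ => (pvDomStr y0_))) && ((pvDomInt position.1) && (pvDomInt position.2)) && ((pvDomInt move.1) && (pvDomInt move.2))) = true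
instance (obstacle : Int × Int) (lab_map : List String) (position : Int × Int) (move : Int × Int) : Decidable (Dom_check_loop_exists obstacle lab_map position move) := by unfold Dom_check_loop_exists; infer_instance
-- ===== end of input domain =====

-- B replaces A's visited-set simulation by a pure step function iterated a fixed pigeonhole
-- bound of moves (no visited set) — an alternative algorithm of the same worst-case cost.

-- ===== PORT A =====
-- Python's change_direction returns None for a non-cardinal direction (the caller's unpacking
-- then raises TypeError — excluded by Pre_); modelled as `none`.
def change_direction (x : Int) (y : Int) : Option (Int × Int) :=
  if x = -1 ∧ y = 0 then some (0, 1)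
  else if x = 0 ∧ y = 1 then some (1, 0)
  else if x = 1 ∧ y = 0 then some (0, -1)
  else if x = 0 ∧ y = -1 then some (-1, 0)
  else none

-- lab_map[i][j] == '#' or (i, j) == obstacle; a column index past the row's end would be an
-- IndexError in Python (excluded by Pre_) — read as `not '#'` here.
def aBlocked (obstacle : Int × Int) (lab_map : List String) (i j : Int) : Bool :=
  (((PySem.List.pyGet? lab_map i).bind fun row => PySem.Str.pyGet? row j) == some '#') ||
    ((i, j) == obstacle)

-- the inner `while change_count < 4 and …` loop; fuel k = 4 - change_count;
-- some (true, _, _) = the loop ended with change_count == 4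
def aRot (cond : Int → Int → Bool) : Nat → Int → Int → Option (Bool × Int × Int)
  | 0, dx, dy => some (true, dx, dy)
  | k + 1, dx, dy =>
      if cond dx dy then
        match change_direction dx dy with
        | some (dx', dy') => aRot cond k dx' dy'
        | none => none
      else some (false, dx, dy)

-- the outer `while 0 <= x < x_dim and 0 <= y < y_dim` loop. The fuel 4*x_dim*y_dim + 2 is never
-- exhausted on inputs satisfying Pre_: every iteration either returns or adds a fresh in-bounds
-- (position, cardinal direction) state to visited, and there are at most 4*x_dim*y_dim of those.
def aLoop (obstacle : Int × Int) (lab_map : List String) (x_dim y_dim : Int) :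
    Nat → PySem.Set ((Int × Int) × (Int × Int)) → Int → Int → Int → Int → Bool
  | 0, _, _, _, _, _ => false
  | n + 1, visited, x, y, dx, dy =>
    if 0 ≤ x ∧ x < x_dim ∧ 0 ≤ y ∧ y < y_dim then
      if PySem.Set.contains visited ((x, y), (dx, dy)) then true
      else
        let visited' := PySem.Set.add visited ((x, y), (dx, dy))
        if 0 > x + dx ∨ x + dx ≥ x_dim ∨ 0 > y + dy ∨ y + dy ≥ y_dim then false
        else
          match aRot (fun dx' dy' =>
              decide (0 ≤ x + dx') && decide (x + dx' < x_dim) &&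
              decide (0 ≤ y + dy') && decide (y + dy' < y_dim) &&
              aBlocked obstacle lab_map (x + dx') (y + dy')) 4 dx dy with
          | none => false
          | some (true, _, _) => true
          | some (false, dx', dy') =>
              aLoop obstacle lab_map x_dim y_dim n visited' (x + dx') (y + dy') dx' dy'
    else false

-- len(lab_map[0]) raises IndexError on an empty lab_map (excluded by Pre_): headD "" here.
def check_loop_exists (obstacle : Int × Int) (lab_map : List String) (position : Int × Int) (move : Int × Int) : Bool :=
  aLoop obstacle lab_map (lab_map.length : Int) (PySem.Str.len (lab_map.headD ""))
    (4 * lab_map.length * (lab_map.headD "").toList.length + 2)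
    PySem.Set.empty position.1 position.2 move.1 move.2

-- ===== PORT B =====
def bTurn : PySem.Dict (Int × Int) (Int × Int) :=
  PySem.Dict.ofList [((-1, 0), (0, 1)), ((0, 1), (1, 0)), ((1, 0), (0, -1)), ((0, -1), (-1, 0))]

-- Source B's `blocked` helper: lab_map[x][y] == '#' or (x, y) == obstacle
def bBlocked (obstacle : Int × Int) (lab_map : List String) (i j : Int) : Bool :=
  (((PySem.List.pyGet? lab_map i).bind fun row => PySem.Str.pyGet? row j) == some '#') ||
    ((i, j) == obstacle)

-- the `for _ in range(4)` rotation inside Source B's step; `turn[(dx, dy)]` raises KeyError on a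
-- non-cardinal direction (excluded by Pre_) — read as the trapped outcome here.
def bRot (cond : Int → Int → Bool) (x y : Int) (s : (Int × Int) × (Int × Int)) :
    Nat → Int → Int → Option ((Int × Int) × (Int × Int))
  | 0, _, _ => some s
  | k + 1, dx, dy =>
      if cond dx dy then
        match PySem.Dict.get? bTurn (dx, dy) with
        | some (dx', dy') => bRot cond x y s k dx' dy'
        | none => some s
      else some ((x + dx, y + dy), (dx, dy))

-- Source B's step: one guard move; none = the guard walks off the map.
def bStep (obstacle : Int × Int) (lab_map : List String) (rows cols : Int)
    (s : (Int × Int) × (Int × Int)) : Option ((Int × Int) × (Int × Int)) :=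
  if ¬ (0 ≤ s.1.1 ∧ s.1.1 < rows ∧ 0 ≤ s.1.2 ∧ s.1.2 < cols) then none
  else if ¬ (0 ≤ s.1.1 + s.2.1 ∧ s.1.1 + s.2.1 < rows ∧ 0 ≤ s.1.2 + s.2.2 ∧ s.1.2 + s.2.2 < cols) then none
  else bRot (fun dx' dy' =>
      decide (0 ≤ s.1.1 + dx') && decide (s.1.1 + dx' < rows) &&
      decide (0 ≤ s.1.2 + dy') && decide (s.1.2 + dy' < cols) &&
      bBlocked obstacle lab_map (s.1.1 + dx') (s.1.2 + dy')) s.1.1 s.1.2 s 4 s.2.1 s.2.2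

-- Source B's main `for _ in range(4 * rows * cols + 1)` loop.
def bLoop (f : (Int × Int) × (Int × Int) → Option ((Int × Int) × (Int × Int))) :
    Nat → (Int × Int) × (Int × Int) → Bool
  | 0, _ => true
  | n + 1, s =>
      match f s with
      | none => false
      | some s' => bLoop f n s'

def check_loop_exists_alt (obstacle : Int × Int) (lab_map : List String) (position : Int × Int) (move : Int × Int) : Bool :=
  bLoop (bStep obstacle lab_map (lab_map.length : Int) (PySem.Str.len (lab_map.headD "")))
    (4 * lab_map.length * (lab_map.headD "").toList.length + 1) (position, move)

-- ===== PRECONDITION & SPEC =====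
-- Pre_ admits every input whose guard walk provably raises no exception: lab_map non-empty
-- (len(lab_map[0]) raises IndexError on []), and then either the start position is off the map,
-- or the very first move would leave the map (in both cases A returns False before ever turning
-- or indexing a row), or the rows are at least as long as the first row AND `move` is one of the
-- four cardinal directions. Excluded but still returning are some walks with a ragged map or a
-- non-cardinal `move` that happen never to index a short row / never to get blocked (A's
-- change_direction returns None and the unpacking raises TypeError on a blocked non-cardinal
-- guard; a reached short row raises IndexError) — see cites; B agrees there anyway.
def Pre_check_loop_exists (obstacle : Int × Int) (lab_map : List String) (position : Int × Int) (move : Int × Int) : Prop :=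
  lab_map ≠ [] ∧
  (¬ (0 ≤ position.1 ∧ position.1 < (lab_map.length : Int) ∧
      0 ≤ position.2 ∧ position.2 < ((lab_map.headD "").toList.length : Int)) ∨
   ¬ (0 ≤ position.1 + move.1 ∧ position.1 + move.1 < (lab_map.length : Int) ∧
      0 ≤ position.2 + move.2 ∧ position.2 + move.2 < ((lab_map.headD "").toList.length : Int)) ∨
   ((∀ row ∈ lab_map, (lab_map.headD "").toList.length ≤ row.toList.length) ∧
    (move = (-1, 0) ∨ move = (0, 1) ∨ move = (1, 0) ∨ move = (0, -1))))
instance (obstacle : Int × Int) (lab_map : List String) (position : Int × Int) (move : Int × Int) : Decidable (Pre_check_loop_exists obstacle lab_map position move) := by unfold Pre_check_loop_exists; infer_instance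

def pvWitness_check_loop_exists : (Int × Int) × List String × (Int × Int) × (Int × Int) :=
  ((1, 1), [".#..", "....", "..#."], (1, 0), (0, 1))

def Spec_check_loop_exists (obstacle : Int × Int) (lab_map : List String) (position : Int × Int) (move : Int × Int) (out : Bool) : Prop := out = check_loop_exists_alt obstacle lab_map position move
instance (obstacle : Int × Int) (lab_map : List String) (position : Int × Int) (move : Int × Int) (out : Bool) : Decidable (Spec_check_loop_exists obstacle lab_map position move out) := by unfold Spec_check_loop_exists; infer_instance

-- ===== CLAIM (what is proved, stated in full; the proofs are below) =====
def Claim_equal_check_loop_exists : Prop := ∀ (obstacle : Int × Int) (lab_map : List String) (position : Int × Int) (move : Int × Int), Dom_check_loop_exists obstacle lab_map position move → Pre_check_loop_exists obstacle lab_map position move → Spec_check_loop_exists obstacle lab_map position move (check_loop_exists obstacle lab_map position move)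

-- ===== LEMMAS AND PROOFS =====

-- the four cardinal directions
def pvCard (d : Int × Int) : Prop :=
  d = (-1, 0) ∨ d = (0, 1) ∨ d = (1, 0) ∨ d = (0, -1)

def pvDirIdx (d : Int × Int) : Nat :=
  if d = (-1, 0) then 0 else if d = (0, 1) then 1 else if d = (1, 0) then 2 else 3

-- n-fold iteration of the step function
def pvIter (f : (Int × Int) × (Int × Int) → Option ((Int × Int) × (Int × Int))) :
    Nat → (Int × Int) × (Int × Int) → Option ((Int × Int) × (Int × Int))
  | 0, s => some s
  | n + 1, s =>
      match f s with
      | none => none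
      | some s' => pvIter f n s'

theorem bLoop_eq_isSome (f : (Int × Int) × (Int × Int) → Option ((Int × Int) × (Int × Int)))
    (n : Nat) (s : (Int × Int) × (Int × Int)) : bLoop f n s = (pvIter f n s).isSome := by
  induction n generalizing s with
  | zero => simp [bLoop, pvIter]
  | succ n ih =>
    simp only [bLoop, pvIter]
    cases f s with
    | none => simp
    | some s' => exact ih s'

theorem pvIter_add (f : (Int × Int) × (Int × Int) → Option ((Int × Int) × (Int × Int)))
    (a b : Nat) (s : (Int × Int) × (Int × Int)) :
    pvIter f (a + b) s = match pvIter f a s with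
      | none => none
      | some t => pvIter f b t := by
  induction a generalizing s with
  | zero => simp [pvIter]
  | succ a ih =>
    have h : a + 1 + b = (a + b) + 1 := by omega
    rw [h]
    simp only [pvIter]
    cases f s with
    | none => rfl
    | some s' => exact ih s'

theorem pvIter_none_mono (f : (Int × Int) × (Int × Int) → Option ((Int × Int) × (Int × Int)))
    {n m : Nat} {s : (Int × Int) × (Int × Int)} (h : pvIter f n s = none) (hnm : n ≤ m) :
    pvIter f m s = none := by
  have : m = n + (m - n) := by omega
  rw [this, pvIter_add, h]

theorem cycle_alive (f : (Int × Int) × (Int × Int) → Option ((Int × Int) × (Int × Int)))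
    {i j : Nat} {s t : (Int × Int) × (Int × Int)}
    (hi : pvIter f i s = some t) (hj : pvIter f j s = some t) (hij : i < j) :
    ∀ n, (pvIter f n s).isSome := by
  have shift : ∀ b, pvIter f (i + b) s = pvIter f (j + b) s := by
    intro b; rw [pvIter_add, pvIter_add, hi, hj]
  intro n
  induction n using Nat.strong_induction_on with
  | _ n ih =>
    by_cases hn : n ≤ j
    · cases hcase : pvIter f n s with
      | none => exact absurd (pvIter_none_mono f hcase hn) (by rw [hj]; simp)
      | some _ => simp
    · have hrw : pvIter f n s = pvIter f (n - (j - i)) s := by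
        have h1 : n = j + (n - j) := by omega
        have h2 : n - (j - i) = i + (n - j) := by omega
        rw [h2, shift (n - j), ← h1]
      rw [hrw]
      exact ih (n - (j - i)) (by omega)

theorem blocked_eq : aBlocked = bBlocked := rfl

theorem bTurn_get? (dx dy : Int) :
    PySem.Dict.get? bTurn (dx, dy) = change_direction dx dy := by
  by_cases h1 : dx = -1 ∧ dy = 0
  · obtain ⟨rfl, rfl⟩ := h1; rfl
  · by_cases h2 : dx = 0 ∧ dy = 1
    · obtain ⟨rfl, rfl⟩ := h2; rfl
    · by_cases h3 : dx = 1 ∧ dy = 0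
      · obtain ⟨rfl, rfl⟩ := h3; rfl
      · by_cases h4 : dx = 0 ∧ dy = -1
        · obtain ⟨rfl, rfl⟩ := h4; rfl
        · have g : change_direction dx dy = none := by
            simp only [change_direction, h1, h2, h3, h4, if_false]
          rw [g, show bTurn = PySem.Dict.mk
              [((-1, 0), (0, 1)), ((0, 1), (1, 0)), ((1, 0), (0, -1)), ((0, -1), (-1, 0))] from rfl]
          simp only [PySem.Dict.get?_mk_cons, beq_iff_eq, Prod.mk.injEq]
          split_ifs with a b c d
          · exact absurd a (by omega)
          · exact absurd b (by omega)
          · exact absurd c (by omega)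
          · exact absurd d (by omega)
          · exact PySem.Dict.get?_empty _

theorem card_turn {d : Int × Int} (h : pvCard d) :
    ∃ d', change_direction d.1 d.2 = some d' ∧ pvCard d' := by
  rcases h with rfl | rfl | rfl | rfl
  · exact ⟨(0, 1), by norm_num [change_direction], Or.inr (Or.inl rfl)⟩
  · exact ⟨(1, 0), by norm_num [change_direction], Or.inr (Or.inr (Or.inl rfl))⟩
  · exact ⟨(0, -1), by norm_num [change_direction], Or.inr (Or.inr (Or.inr rfl))⟩
  · exact ⟨(-1, 0), by norm_num [change_direction], Or.inl rfl⟩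

-- correspondence of the two rotation loops (parametric in the shared condition)
theorem rot_rel (cond : Int → Int → Bool) (x y : Int) (s : (Int × Int) × (Int × Int)) :
    ∀ (k : Nat) (dx dy : Int), pvCard (dx, dy) →
      ∃ b dx' dy', aRot cond k dx dy = some (b, dx', dy') ∧ pvCard (dx', dy') ∧
        bRot cond x y s k dx dy =
          some (if b then s else ((x + dx', y + dy'), (dx', dy'))) := by
  intro k
  induction k with
  | zero =>
    intro dx dy hc
    exact ⟨true, dx, dy, rfl, hc, rfl⟩
  | succ k ih =>
    intro dx dy hc
    by_cases hcond : cond dx dy = true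
    · obtain ⟨d', hd', hcd'⟩ := card_turn hc
      obtain ⟨b, dx', dy', h1, h2, h3⟩ := ih d'.1 d'.2 (by simpa using hcd')
      refine ⟨b, dx', dy', ?_, h2, ?_⟩
      · simp only [aRot, hcond, if_true, hd']
        exact h1
      · simp only [bRot, hcond, if_true, bTurn_get?, hd']
        exact h3
    · refine ⟨false, dx, dy, ?_, hc, ?_⟩
      · simp [aRot, hcond]
      · simp [bRot, hcond]

theorem step_none_of_oob (ob : Int × Int) (lab : List String) (rows cols : Int)
    (s : (Int × Int) × (Int × Int))
    (h : ¬ (0 ≤ s.1.1 ∧ s.1.1 < rows ∧ 0 ≤ s.1.2 ∧ s.1.2 < cols)) :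
    bStep ob lab rows cols s = none := by
  simp [bStep, h]

-- outcome of one bStep from an in-bounds state, phrased through A's rotation loop
theorem step_char (ob : Int × Int) (lab : List String) (rows cols x y dx dy : Int)
    (hin : 0 ≤ x ∧ x < rows ∧ 0 ≤ y ∧ y < cols) (hc : pvCard (dx, dy)) :
    (¬ (0 ≤ x + dx ∧ x + dx < rows ∧ 0 ≤ y + dy ∧ y + dy < cols) ∧
        bStep ob lab rows cols ((x, y), (dx, dy)) = none) ∨
    (∃ b dx' dy',
        (0 ≤ x + dx ∧ x + dx < rows ∧ 0 ≤ y + dy ∧ y + dy < cols) ∧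
        aRot (fun dx' dy' => decide (0 ≤ x + dx') && decide (x + dx' < rows) &&
            decide (0 ≤ y + dy') && decide (y + dy' < cols) &&
            aBlocked ob lab (x + dx') (y + dy')) 4 dx dy = some (b, dx', dy') ∧
        pvCard (dx', dy') ∧
        bStep ob lab rows cols ((x, y), (dx, dy)) =
          some (if b then ((x, y), (dx, dy)) else ((x + dx', y + dy'), (dx', dy')))) := by
  by_cases hpre : 0 ≤ x + dx ∧ x + dx < rows ∧ 0 ≤ y + dy ∧ y + dy < cols
  · right
    obtain ⟨b, dx', dy', h1, h2, h3⟩ := rot_rel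
      (fun dx' dy' => decide (0 ≤ x + dx') && decide (x + dx' < rows) &&
        decide (0 ≤ y + dy') && decide (y + dy' < cols) &&
        bBlocked ob lab (x + dx') (y + dy')) x y ((x, y), (dx, dy)) 4 dx dy hc
    refine ⟨b, dx', dy', hpre, ?_, h2, ?_⟩
    · rw [blocked_eq]; exact h1
    · show (if ¬ _ then _ else if ¬ _ then _ else _) = _
      rw [if_neg (not_not_intro hin), if_neg (not_not_intro hpre)]
      exact h3
  · left
    refine ⟨hpre, ?_⟩
    show (if ¬ _ then _ else if ¬ _ then _ else _) = _
    rw [if_neg (not_not_intro hin), if_pos hpre]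

theorem iter_card (ob : Int × Int) (lab : List String) (rows cols : Int) :
    ∀ (i : Nat) (s0 t : (Int × Int) × (Int × Int)), pvCard s0.2 →
      pvIter (bStep ob lab rows cols) i s0 = some t → pvCard t.2 := by
  intro i
  induction i with
  | zero => intro s0 t h0 ht; cases ht; exact h0
  | succ i ih =>
    intro s0 t h0 ht
    simp only [pvIter] at ht
    cases hstep : bStep ob lab rows cols s0 with
    | none => rw [hstep] at ht; exact absurd ht (by simp)
    | some s1 =>
      rw [hstep] at ht
      refine ih s1 t ?_ ht
      obtain ⟨⟨x, y⟩, dx, dy⟩ := s0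
      by_cases hin : 0 ≤ x ∧ x < rows ∧ 0 ≤ y ∧ y < cols
      · rcases step_char ob lab rows cols x y dx dy hin h0 with ⟨_, hnone⟩ | ⟨b, dx', dy', _, _, hcd, hsome⟩
        · rw [hnone] at hstep; cases hstep
        · rw [hsome] at hstep
          cases hstep
          cases b with
          | true => exact h0
          | false => exact hcd
      · rw [step_none_of_oob ob lab rows cols _ hin] at hstep; cases hstep

theorem pvDirIdx_lt (d : Int × Int) : pvDirIdx d < 4 := by
  unfold pvDirIdx; split_ifs <;> omega

theorem pvDirIdx_inj {d1 d2 : Int × Int} (h1 : pvCard d1) (h2 : pvCard d2)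
    (h : pvDirIdx d1 = pvDirIdx d2) : d1 = d2 := by
  rcases h1 with rfl | rfl | rfl | rfl <;> rcases h2 with rfl | rfl | rfl | rfl <;>
    first | rfl | (exfalso; revert h; decide)

theorem pvEnc_lt (Cn R : Nat) (t : (Int × Int) × (Int × Int))
    (hb : 0 ≤ t.1.1 ∧ t.1.1 < (R : Int) ∧ 0 ≤ t.1.2 ∧ t.1.2 < (Cn : Int)) :
    (t.1.1.toNat * Cn + t.1.2.toNat) * 4 + pvDirIdx t.2 < 4 * R * Cn := by
  have hx : t.1.1.toNat < R := by omega
  have hy : t.1.2.toNat < Cn := by omega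
  have hd := pvDirIdx_lt t.2
  have h1 : t.1.1.toNat * Cn + t.1.2.toNat < R * Cn := by
    calc t.1.1.toNat * Cn + t.1.2.toNat < t.1.1.toNat * Cn + Cn := by omega
      _ = (t.1.1.toNat + 1) * Cn := by ring
      _ ≤ R * Cn := Nat.mul_le_mul_right _ (by omega)
  calc (t.1.1.toNat * Cn + t.1.2.toNat) * 4 + pvDirIdx t.2
      < (t.1.1.toNat * Cn + t.1.2.toNat) * 4 + 4 := by omega
    _ = (t.1.1.toNat * Cn + t.1.2.toNat + 1) * 4 := by ring
    _ ≤ (R * Cn) * 4 := Nat.mul_le_mul_right _ (by omega)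
    _ = 4 * R * Cn := by ring

theorem pvEnc_inj (Cn R : Nat) (t1 t2 : (Int × Int) × (Int × Int))
    (hb1 : 0 ≤ t1.1.1 ∧ t1.1.1 < (R : Int) ∧ 0 ≤ t1.1.2 ∧ t1.1.2 < (Cn : Int))
    (hb2 : 0 ≤ t2.1.1 ∧ t2.1.1 < (R : Int) ∧ 0 ≤ t2.1.2 ∧ t2.1.2 < (Cn : Int))
    (hc1 : pvCard t1.2) (hc2 : pvCard t2.2)
    (h : (t1.1.1.toNat * Cn + t1.1.2.toNat) * 4 + pvDirIdx t1.2 =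
         (t2.1.1.toNat * Cn + t2.1.2.toNat) * 4 + pvDirIdx t2.2) : t1 = t2 := by
  have hd1 := pvDirIdx_lt t1.2
  have hd2 := pvDirIdx_lt t2.2
  set q1 := t1.1.1.toNat * Cn + t1.1.2.toNat with hq1
  set q2 := t2.1.1.toNat * Cn + t2.1.2.toNat with hq2
  have hq : q1 = q2 ∧ pvDirIdx t1.2 = pvDirIdx t2.2 := by omega
  have hCn : 0 < Cn := by omega
  have hy1 : t1.1.2.toNat < Cn := by omega
  have hy2 : t2.1.2.toNat < Cn := by omega
  have hxeq : t1.1.1.toNat = t2.1.1.toNat := by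
    have e1 : q1 / Cn = t1.1.1.toNat := by
      rw [hq1, Nat.mul_comm t1.1.1.toNat Cn, Nat.mul_add_div hCn, Nat.div_eq_of_lt hy1]; omega
    have e2 : q2 / Cn = t2.1.1.toNat := by
      rw [hq2, Nat.mul_comm t2.1.1.toNat Cn, Nat.mul_add_div hCn, Nat.div_eq_of_lt hy2]; omega
    rw [← e1, ← e2, hq.1]
  have hyeq : t1.1.2.toNat = t2.1.2.toNat := by
    have e1 : q1 % Cn = t1.1.2.toNat := by
      rw [hq1, Nat.mul_comm t1.1.1.toNat Cn, Nat.mul_add_mod, Nat.mod_eq_of_lt hy1]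
    have e2 : q2 % Cn = t2.1.2.toNat := by
      rw [hq2, Nat.mul_comm t2.1.1.toNat Cn, Nat.mul_add_mod, Nat.mod_eq_of_lt hy2]
    rw [← e1, ← e2, hq.1]
  have hdir := pvDirIdx_inj hc1 hc2 hq.2
  have hx : t1.1.1 = t2.1.1 := by omega
  have hy : t1.1.2 = t2.1.2 := by omega
  exact Prod.ext (Prod.ext hx hy) hdir

theorem pigeonhole (R Cn : Nat)
    (f : (Int × Int) × (Int × Int) → Option ((Int × Int) × (Int × Int)))
    (s0 : (Int × Int) × (Int × Int)) (j : Nat)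
    (hval : ∀ i, i < j → ∃ t, pvIter f i s0 = some t ∧
        (0 ≤ t.1.1 ∧ t.1.1 < (R : Int) ∧ 0 ≤ t.1.2 ∧ t.1.2 < (Cn : Int)) ∧ pvCard t.2)
    (hdis : ∀ i1 i2 t, i1 < j → i2 < j → pvIter f i1 s0 = some t →
        pvIter f i2 s0 = some t → i1 = i2) :
    j ≤ 4 * R * Cn := by
  have key := Finset.card_le_card_of_injOn
    (f := fun i => ((((pvIter f i s0).getD s0).1.1.toNat * Cn +
        ((pvIter f i s0).getD s0).1.2.toNat) * 4 + pvDirIdx ((pvIter f i s0).getD s0).2))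
    (s := Finset.range j) (t := Finset.range (4 * R * Cn)) ?_ ?_
  · simpa using key
  · intro i hi
    simp only [Finset.coe_range, Set.mem_Iio] at hi
    simp only [Finset.mem_coe, Finset.mem_range]
    obtain ⟨t, ht, hb, hc⟩ := hval i hi
    rw [ht]
    exact pvEnc_lt Cn R t hb
  · intro i1 hi1 i2 hi2 h
    simp only [Finset.coe_range, Set.mem_Iio] at hi1 hi2
    dsimp only at h
    obtain ⟨t1, ht1, hb1, hc1⟩ := hval i1 hi1
    obtain ⟨t2, ht2, hb2, hc2⟩ := hval i2 hi2
    rw [ht1, ht2] at h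
    simp only [Option.getD_some] at h
    have := pvEnc_inj Cn R t1 t2 hb1 hb2 hc1 hc2 h
    subst this
    exact hdis i1 i2 t1 hi1 hi2 ht1 ht2

-- the main correspondence: A's visited-set loop against alive-after-N'-steps of bStep
theorem main_loop (ob : Int × Int) (lab : List String) (R Cn : Nat)
    (s0 : (Int × Int) × (Int × Int)) (hcard0 : pvCard s0.2) :
    ∀ (m : Nat) (V : PySem.Set ((Int × Int) × (Int × Int)))
      (s : (Int × Int) × (Int × Int)) (j : Nat),
      pvIter (bStep ob lab (R : Int) (Cn : Int)) j s0 = some s →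
      (∀ t, t ∈ V ↔ ∃ i, i < j ∧ pvIter (bStep ob lab (R : Int) (Cn : Int)) i s0 = some t) →
      (∀ i1 i2 t, i1 < j → i2 < j → pvIter (bStep ob lab (R : Int) (Cn : Int)) i1 s0 = some t →
          pvIter (bStep ob lab (R : Int) (Cn : Int)) i2 s0 = some t → i1 = i2) →
      (∀ i t, i < j → pvIter (bStep ob lab (R : Int) (Cn : Int)) i s0 = some t →
          (0 ≤ t.1.1 ∧ t.1.1 < (R : Int) ∧ 0 ≤ t.1.2 ∧ t.1.2 < (Cn : Int))) →
      m + j = 4 * R * Cn + 2 →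
      aLoop ob lab (R : Int) (Cn : Int) m V s.1.1 s.1.2 s.2.1 s.2.2 =
        (pvIter (bStep ob lab (R : Int) (Cn : Int)) (4 * R * Cn + 1) s0).isSome := by
  intro m
  induction m with
  | zero =>
    intro V s j hj hV hdis hbnd hm
    exfalso
    have hple : j ≤ 4 * R * Cn := by
      refine pigeonhole R Cn _ s0 j (fun i hi => ?_) hdis
      cases hit : pvIter (bStep ob lab (R : Int) (Cn : Int)) i s0 with
      | none =>
        exfalso
        have := pvIter_none_mono (bStep ob lab (R : Int) (Cn : Int)) hit (le_of_lt hi)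
        rw [hj] at this; cases this
      | some t =>
        exact ⟨t, rfl, hbnd i t hi hit, iter_card ob lab _ _ i s0 t hcard0 hit⟩
    omega
  | succ m ih =>
    intro V s j hj hV hdis hbnd hm
    obtain ⟨⟨x, y⟩, dx, dy⟩ := s
    have hcards : pvCard (dx, dy) := iter_card ob lab _ _ j s0 _ hcard0 hj
    simp only [aLoop]
    by_cases hin : 0 ≤ x ∧ x < (R : Int) ∧ 0 ≤ y ∧ y < (Cn : Int)
    · rw [if_pos hin]
      by_cases hmem : ((x, y), (dx, dy)) ∈ V
      · -- visited hit: a state repeats, so the orbit is alive forever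
        rw [if_pos ((PySem.Set.contains_iff V _).mpr hmem)]
        obtain ⟨i, hij, hi⟩ := (hV _).mp hmem
        exact ((cycle_alive _ hi hj hij) (4 * R * Cn + 1)).symm
      · rw [if_neg (by simpa [PySem.Set.contains_iff V] using hmem)]
        -- number of distinct in-bounds states seen so far bounds j
        have hple : j ≤ 4 * R * Cn := by
          refine pigeonhole R Cn _ s0 j (fun i hi => ?_) hdis
          cases hit : pvIter (bStep ob lab (R : Int) (Cn : Int)) i s0 with
          | none =>
            exfalso
            have := pvIter_none_mono (bStep ob lab (R : Int) (Cn : Int)) hit (le_of_lt hi)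
            rw [hj] at this; cases this
          | some t =>
            exact ⟨t, rfl, hbnd i t hi hit, iter_card ob lab _ _ i s0 t hcard0 hit⟩
        have hnext1 : pvIter (bStep ob lab (R : Int) (Cn : Int)) (j + 1) s0 =
            bStep ob lab (R : Int) (Cn : Int) ((x, y), (dx, dy)) := by
          rw [pvIter_add, hj]
          simp only [pvIter]
          cases bStep ob lab (R : Int) (Cn : Int) ((x, y), (dx, dy)) <;> rfl
        rcases step_char ob lab (R : Int) (Cn : Int) x y dx dy hin hcards with
          ⟨hoob, hnone⟩ | ⟨b, dx', dy', hpre, harot, hcd, hsome⟩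
        · -- the next cell is off the map: A returns False, the orbit dies at j+1
          rw [if_pos (by omega)]
          have hdead : pvIter (bStep ob lab (R : Int) (Cn : Int)) (4 * R * Cn + 1) s0 = none :=
            pvIter_none_mono _ (by rw [hnext1]; exact hnone) (by omega)
          rw [hdead]; rfl
        · rw [if_neg (by omega)]
          rw [harot]
          cases b with
          | true =>
            -- trapped: f s = s, a self-loop, alive forever
            have hfix : pvIter (bStep ob lab (R : Int) (Cn : Int)) (j + 1) s0 =
                some ((x, y), (dx, dy)) := by rw [hnext1, hsome]; rfl
            exact ((cycle_alive _ hj hfix (by omega)) (4 * R * Cn + 1)).symm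
          | false =>
            -- ordinary advance: recurse with the grown visited set
            have hnext : pvIter (bStep ob lab (R : Int) (Cn : Int)) (j + 1) s0 =
                some ((x + dx', y + dy'), (dx', dy')) := by rw [hnext1, hsome]; rfl
            refine ih _ _ (j + 1) hnext ?_ ?_ ?_ (by omega)
            · intro t
              rw [PySem.Set.mem_add, hV t]
              constructor
              · rintro (⟨i, hi, hit⟩ | rfl)
                · exact ⟨i, by omega, hit⟩
                · exact ⟨j, by omega, hj⟩
              · rintro ⟨i, hi, hit⟩
                by_cases hij : i < j
                · exact Or.inl ⟨i, hij, hit⟩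
                · have e : i = j := by omega
                  rw [e, hj] at hit; cases hit
                  exact Or.inr rfl
            · intro i1 i2 t hi1 hi2 ht1 ht2
              by_cases c1 : i1 < j
              · by_cases c2 : i2 < j
                · exact hdis i1 i2 t c1 c2 ht1 ht2
                · have e2 : i2 = j := by omega
                  rw [e2, hj] at ht2; cases ht2
                  exact absurd ((hV _).mpr ⟨i1, c1, ht1⟩) hmem
              · have e1 : i1 = j := by omega
                rw [e1, hj] at ht1; cases ht1
                by_cases c2 : i2 < j
                · exact absurd ((hV _).mpr ⟨i2, c2, ht2⟩) hmem
                · omega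
            · intro i t hi hit
              by_cases hij : i < j
              · exact hbnd i t hij hit
              · have e : i = j := by omega
                rw [e, hj] at hit; cases hit
                exact hin
    · -- current position off the map: A returns False, the orbit dies at j+1
      rw [if_neg hin]
      have hple : j ≤ 4 * R * Cn := by
        refine pigeonhole R Cn _ s0 j (fun i hi => ?_) hdis
        cases hit : pvIter (bStep ob lab (R : Int) (Cn : Int)) i s0 with
        | none =>
          exfalso
          have := pvIter_none_mono (bStep ob lab (R : Int) (Cn : Int)) hit (le_of_lt hi)
          rw [hj] at this; cases this
        | some t =>
          exact ⟨t, rfl, hbnd i t hi hit, iter_card ob lab _ _ i s0 t hcard0 hit⟩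
      have hnext1 : pvIter (bStep ob lab (R : Int) (Cn : Int)) (j + 1) s0 = none := by
        rw [pvIter_add, hj]
        simp only [pvIter]
        rw [step_none_of_oob ob lab _ _ _ hin]
      have hdead : pvIter (bStep ob lab (R : Int) (Cn : Int)) (4 * R * Cn + 1) s0 = none :=
        pvIter_none_mono _ hnext1 (by omega)
      rw [hdead]; rfl

theorem aLoop_oob (ob : Int × Int) (lab : List String) (xd yd : Int) (m : Nat)
    (V : PySem.Set ((Int × Int) × (Int × Int))) (x y dx dy : Int)
    (hin : ¬ (0 ≤ x ∧ x < xd ∧ 0 ≤ y ∧ y < yd)) :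
    aLoop ob lab xd yd (m + 1) V x y dx dy = false := by
  simp only [aLoop]
  rw [if_neg hin]

theorem aLoop_preoob (ob : Int × Int) (lab : List String) (xd yd : Int) (m : Nat)
    (x y dx dy : Int)
    (hin : 0 ≤ x ∧ x < xd ∧ 0 ≤ y ∧ y < yd)
    (hnext : ¬ (0 ≤ x + dx ∧ x + dx < xd ∧ 0 ≤ y + dy ∧ y + dy < yd)) :
    aLoop ob lab xd yd (m + 1) PySem.Set.empty x y dx dy = false := by
  simp only [aLoop]
  rw [if_pos hin]
  rw [show PySem.Set.contains PySem.Set.empty ((x, y), (dx, dy)) = false from rfl]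
  simp only [Bool.false_eq_true, if_false]
  rw [if_pos (by omega)]

theorem step_none_of_preoob (ob : Int × Int) (lab : List String) (rows cols : Int)
    (s : (Int × Int) × (Int × Int))
    (hin : 0 ≤ s.1.1 ∧ s.1.1 < rows ∧ 0 ≤ s.1.2 ∧ s.1.2 < cols)
    (hnext : ¬ (0 ≤ s.1.1 + s.2.1 ∧ s.1.1 + s.2.1 < rows ∧ 0 ≤ s.1.2 + s.2.2 ∧ s.1.2 + s.2.2 < cols)) :
    bStep ob lab rows cols s = none := by
  show (if ¬ _ then _ else if ¬ _ then _ else _) = _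
  rw [if_neg (not_not_intro hin), if_pos hnext]

theorem bLoop_dead (f : (Int × Int) × (Int × Int) → Option ((Int × Int) × (Int × Int)))
    (n : Nat) (s : (Int × Int) × (Int × Int)) (h : f s = none) :
    bLoop f (n + 1) s = false := by
  simp only [bLoop, h]

-- ===== VERDICT (by name: the statement is the Claim_ definition above) =====
theorem check_loop_exists_spec : Claim_equal_check_loop_exists := by
  intro ob lab pos mv _ hpre
  unfold Spec_check_loop_exists
  unfold check_loop_exists check_loop_exists_alt
  obtain ⟨hne, hcase⟩ := hpre
  have hlen : PySem.Str.len (lab.headD "") = (((lab.headD "").toList.length : Nat) : Int) := by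
    simp [PySem.Str.len_eq]
  rw [hlen]
  by_cases hin : 0 ≤ pos.1 ∧ pos.1 < (lab.length : Int) ∧
      0 ≤ pos.2 ∧ pos.2 < (((lab.headD "").toList.length : Nat) : Int)
  · by_cases hnext : 0 ≤ pos.1 + mv.1 ∧ pos.1 + mv.1 < (lab.length : Int) ∧
        0 ≤ pos.2 + mv.2 ∧ pos.2 + mv.2 < (((lab.headD "").toList.length : Nat) : Int)
    · -- the interesting case: cardinal move over a well-formed map
      have hmv : mv = (-1, 0) ∨ mv = (0, 1) ∨ mv = (1, 0) ∨ mv = (0, -1) := by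
        rcases hcase with h | h | h
        · exact absurd hin h
        · exact absurd hnext h
        · exact h.2
      rw [bLoop_eq_isSome]
      exact main_loop ob lab lab.length (lab.headD "").toList.length (pos, mv)
        (by rcases hmv with h | h | h | h <;> simp [h, pvCard])
        (4 * lab.length * (lab.headD "").toList.length + 2) PySem.Set.empty (pos, mv) 0
        rfl
        (by intro t; constructor
            · intro h; cases h
            · rintro ⟨i, hi, _⟩; omega)
        (by intro i1 i2 t h1 _ _ _; omega)
        (by intro i t hi _; omega)
        (by omega)
    · -- first move leaves the map: A returns False at its bounds pre-check, B dies at step 1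
      rw [show 4 * lab.length * (lab.headD "").toList.length + 2 =
            (4 * lab.length * (lab.headD "").toList.length + 1) + 1 from rfl]
      rw [aLoop_preoob ob lab _ _ _ _ _ _ _ hin hnext]
      rw [show 4 * lab.length * (lab.headD "").toList.length + 1 =
            (4 * lab.length * (lab.headD "").toList.length) + 1 from rfl]
      rw [bLoop_dead _ _ _ (step_none_of_preoob ob lab _ _ (pos, mv) hin hnext)]
  · -- start off the map: A's while-condition fails at once, B's first step returns None
    rw [show 4 * lab.length * (lab.headD "").toList.length + 2 =
          (4 * lab.length * (lab.headD "").toList.length + 1) + 1 from rfl]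
    rw [aLoop_oob ob lab _ _ _ _ _ _ _ _ hin]
    rw [show 4 * lab.length * (lab.headD "").toList.length + 1 =
          (4 * lab.length * (lab.headD "").toList.length) + 1 from rfl]
    rw [bLoop_dead _ _ _ (step_none_of_oob ob lab _ _ (pos, mv) hin)]
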